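-- pv_equiv track=rewrite | github.com/flexxui/flexx | flexx/webruntime/__init__.py | _expand_runtime_name
-- ===== SOURCE A (Python) =====
-- _aliases = {'app': 'firefox-app or nw-app',
--             'browser': ('chrome-browser or firefox-browser or edge-browser '
--                         'or default-browser'),
--             'chrome-browser': 'googlechrome-browser or chromium-browser',
--             'chrome-app': 'googlechrome-app or chromium-app',
--             }
--
-- def _expand_runtime_name(runtime):
--     """ Apply aliases and map "x or y" to ['x', 'y'].
--     """
--     # Normalize
--     for c in (' or ', ',', '|'):
--         runtime = runtime.replace(c, ' ')
--     # Expand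
--     runtimes = []
--     for runtime in runtime.split(' '):
--         runtime = runtime.strip().lower()
--         if runtime in _aliases:
--             runtimes.extend(_expand_runtime_name(_aliases[runtime]))
--         else:
--             runtimes.append(runtime)
--     # Deduplicate
--     runtimes2 = []
--     for runtime in runtimes:
--         if runtime not in runtimes2:
--             runtimes2.append(runtime)
--     return runtimes2
-- ===== SOURCE B (Python) =====
-- _aliases = {'app': 'firefox-app or nw-app',
--             'browser': ('chrome-browser or firefox-browser or edge-browser '
--                         'or default-browser'),
--             'chrome-browser': 'googlechrome-browser or chromium-browser',
--             'chrome-app': 'googlechrome-app or chromium-app',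
--             }
--
--
-- def _normalize_split(s):
--     for c in (' or ', ',', '|'):
--         s = s.replace(c, ' ')
--     return [t.strip().lower() for t in s.split(' ')]
--
--
-- def _expand_runtime_name(runtime):
--     """ Apply aliases and map "x or y" to ['x', 'y'].
--
--     Iterative version: repeatedly substitute alias tokens in the whole
--     token list until none remain, then deduplicate once at the end.
--     """
--     tokens = _normalize_split(runtime)
--     while True:
--         changed = False
--         new_tokens = []
--         for t in tokens:
--             if t in _aliases:
--                 changed = True
--                 new_tokens.extend(_normalize_split(_aliases[t]))
--             else:
--                 new_tokens.append(t)
--         if not changed: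
--             break
--         tokens = new_tokens
--     seen = set()
--     out = []
--     for t in tokens:
--         if t not in seen:
--             seen.add(t)
--             out.append(t)
--     return out
-- ===== Notes on version B (the rewrite author's own statement) =====
-- stated objective: alternative
-- what changed: The per-token recursive alias expansion with a dedup at every recursion level is replaced by an iterative whole-list rewriting loop (substitute alias tokens pass by pass until a fixpoint) followed by a single set-based dedup pass.
import Mathlib
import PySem

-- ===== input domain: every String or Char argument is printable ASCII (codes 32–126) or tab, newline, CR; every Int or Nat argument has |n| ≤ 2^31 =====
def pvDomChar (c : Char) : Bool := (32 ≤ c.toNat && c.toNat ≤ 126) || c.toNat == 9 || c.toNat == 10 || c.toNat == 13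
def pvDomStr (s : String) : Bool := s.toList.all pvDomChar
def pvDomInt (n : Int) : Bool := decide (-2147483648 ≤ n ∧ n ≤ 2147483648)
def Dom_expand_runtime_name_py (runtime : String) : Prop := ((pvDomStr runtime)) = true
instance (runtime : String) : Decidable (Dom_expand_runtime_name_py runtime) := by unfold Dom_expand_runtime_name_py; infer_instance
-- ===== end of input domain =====

-- B replaces A's per-level recursion-with-dedup by iterated whole-list alias substitution to a
-- fixpoint followed by one set-based dedup pass (alternative decomposition, same results).

-- ===== PORT A =====
-- the module constant _aliases (shared data, used by both ports)
def pvAliases : PySem.Dict String String := PySem.Dict.mk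
  [("app", "firefox-app or nw-app"),
   ("browser", "chrome-browser or firefox-browser or edge-browser or default-browser"),
   ("chrome-browser", "googlechrome-browser or chromium-browser"),
   ("chrome-app", "googlechrome-app or chromium-app")]

-- A's recursion (recursive calls happen only on alias values) ported with fuel;
-- the alias table's chains have length ≤ 3, so fuel 4 reproduces the Python on every input.
-- ('runtime.split(" ")' with the non-empty literal separator " " is always some, so .getD [] is exact.)
def pvExpandA : Nat → String → List String
  | 0, _ => []
  | fuel+1, runtime =>
    -- Normalize (runtime = runtime.replace(c, ' ') for c in (' or ', ',', '|')); Expand; Deduplicate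
    (((PySem.Str.split? (PySem.Str.replace (PySem.Str.replace (PySem.Str.replace runtime " or " " ") "," " ") "|" " ") " ").getD []).foldl
      (fun acc t =>
        match PySem.Dict.get? pvAliases (PySem.Str.lower (PySem.Str.strip t)) with
        | some v => acc ++ pvExpandA fuel v
        | none => acc ++ [PySem.Str.lower (PySem.Str.strip t)]) []).foldl
      (fun acc t => if !(acc.contains t) then acc ++ [t] else acc) []

def expand_runtime_name_py (runtime : String) : List String := pvExpandA 4 runtime

-- ===== PORT B =====
-- _normalize_split of Source B
def pvNormSplit (s : String) : List String :=
  ((PySem.Str.split? (PySem.Str.replace (PySem.Str.replace (PySem.Str.replace s " or " " ") "," " ") "|" " ") " ").getD []).map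
    (fun t => PySem.Str.lower (PySem.Str.strip t))

-- one pass of the while-loop body: substitute each alias token, report whether any alias was seen
def pvPassB (tokens : List String) : List String × Bool :=
  tokens.foldl (fun st t =>
    match PySem.Dict.get? pvAliases t with
    | some v => (st.1 ++ pvNormSplit v, true)
    | none => (st.1 ++ [t], st.2)) ([], false)

-- Source B's 'while True' loop ported with fuel 4: the list is provably alias-free after two
-- passes (pv_noalias_twopass below), so the loop always exits within this fuel.
def pvLoopB : Nat → List String → List String
  | 0, tokens => tokens
  | n+1, tokens =>
    if (pvPassB tokens).2 then pvLoopB n (pvPassB tokens).1 else tokens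

-- the final order-preserving dedup with a 'seen' set
def pvDedupB (tokens : List String) : List String :=
  (tokens.foldl (fun st t =>
      if !(PySem.Set.contains st.1 t) then (PySem.Set.add st.1 t, st.2 ++ [t]) else st)
    ((PySem.Set.empty : PySem.Set String), ([] : List String))).2

def expand_runtime_name_py_alt (runtime : String) : List String :=
  pvDedupB (pvLoopB 4 (pvNormSplit runtime))

-- ===== PRECONDITION & SPEC =====
def Spec_expand_runtime_name_py (runtime : String) (out : List String) : Prop := out = expand_runtime_name_py_alt runtime
instance (runtime : String) (out : List String) : Decidable (Spec_expand_runtime_name_py runtime out) := by unfold Spec_expand_runtime_name_py; infer_instance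

-- ===== CLAIM (what is proved, stated in full; the proofs are below) =====
def Claim_equal_expand_runtime_name_py : Prop := ∀ (runtime : String), Dom_expand_runtime_name_py runtime → Spec_expand_runtime_name_py runtime (expand_runtime_name_py runtime)

-- ===== LEMMAS AND PROOFS =====

-- the full (deduplicated) expansion of one normalized token
def pvG (t : String) : List String :=
  if t = "app" then ["firefox-app", "nw-app"]
  else if t = "browser" then ["googlechrome-browser", "chromium-browser", "firefox-browser", "edge-browser", "default-browser"]
  else if t = "chrome-browser" then ["googlechrome-browser", "chromium-browser"]
  else if t = "chrome-app" then ["googlechrome-app", "chromium-app"]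
  else [t]

def pvStepB (t : String) : List String :=
  match PySem.Dict.get? pvAliases t with
  | some v => pvNormSplit v
  | none => [t]

def pvIsAlias (t : String) : Bool := (PySem.Dict.get? pvAliases t).isSome

def pvHA (fuel : Nat) (t : String) : List String :=
  match PySem.Dict.get? pvAliases t with
  | some v => pvExpandA fuel v
  | none => [t]

def pvDedupA (l : List String) : List String :=
  l.foldl (fun acc t => if !(acc.contains t) then acc ++ [t] else acc) []

theorem pv_get?_aliases (t : String) :
    PySem.Dict.get? pvAliases t =
      if t = "app" then some "firefox-app or nw-app"
      else if t = "browser" then some "chrome-browser or firefox-browser or edge-browser or default-browser"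
      else if t = "chrome-browser" then some "googlechrome-browser or chromium-browser"
      else if t = "chrome-app" then some "googlechrome-app or chromium-app"
      else none := by
  by_cases h1 : t = "app"
  · subst h1; decide
  · by_cases h2 : t = "browser"
    · subst h2; decide
    · by_cases h3 : t = "chrome-browser"
      · subst h3; decide
      · by_cases h4 : t = "chrome-app"
        · subst h4; decide
        · rw [if_neg h1, if_neg h2, if_neg h3, if_neg h4]
          have e1 : ("app" == t) = false := by
            simp only [beq_eq_false_iff_ne, ne_eq]; exact fun h => h1 h.symm
          have e2 : ("browser" == t) = false := by
            simp only [beq_eq_false_iff_ne, ne_eq]; exact fun h => h2 h.symm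
          have e3 : ("chrome-browser" == t) = false := by
            simp only [beq_eq_false_iff_ne, ne_eq]; exact fun h => h3 h.symm
          have e4 : ("chrome-app" == t) = false := by
            simp only [beq_eq_false_iff_ne, ne_eq]; exact fun h => h4 h.symm
          show PySem.Dict.get? (PySem.Dict.mk _) t = none
          rw [PySem.Dict.get?_mk_cons, e1, if_neg (by simp),
              PySem.Dict.get?_mk_cons, e2, if_neg (by simp),
              PySem.Dict.get?_mk_cons, e3, if_neg (by simp),
              PySem.Dict.get?_mk_cons, e4, if_neg (by simp)]
          rfl

theorem pvExpandA_succ (fuel : Nat) (r : String) :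
    pvExpandA (fuel + 1) r = pvDedupA ((pvNormSplit r).flatMap (pvHA fuel)) := by
  simp only [pvExpandA, pvNormSplit, pvDedupA]
  apply congrArg (fun l : List String =>
    l.foldl (fun acc t => if !(acc.contains t) then acc ++ [t] else acc) [])
  rw [PySem.List.foldl_congr_mem _ _
        (fun (acc : List String) t => acc ++ pvHA fuel (PySem.Str.lower (PySem.Str.strip t))) _
        (by intro acc t _
            simp only [pvHA]
            cases hg : PySem.Dict.get? pvAliases (PySem.Str.lower (PySem.Str.strip t)) with
            | some v => simp
            | none => simp),
      PySem.List.foldl_append_eq_flatMap, List.flatMap_map]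
  simp

theorem pvHA3_eq_g (t : String) : pvHA 3 t = pvG t := by
  simp only [pvHA]
  rw [pv_get?_aliases]
  by_cases h1 : t = "app"
  · subst h1; decide
  · by_cases h2 : t = "browser"
    · subst h2; decide
    · by_cases h3 : t = "chrome-browser"
      · subst h3; decide
      · by_cases h4 : t = "chrome-app"
        · subst h4; decide
        · simp only [if_neg h1, if_neg h2, if_neg h3, if_neg h4, pvG]

theorem pvA_eq (r : String) :
    expand_runtime_name_py r = pvDedupA ((pvNormSplit r).flatMap pvG) := by
  show pvExpandA (3 + 1) r = _
  rw [pvExpandA_succ, show pvHA 3 = pvG from funext pvHA3_eq_g]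

theorem pvStepB_of_not_alias {t : String} (h : pvIsAlias t = false) : pvStepB t = [t] := by
  simp only [pvIsAlias, Option.isSome_eq_false_iff, Option.isNone_iff_eq_none] at h
  simp [pvStepB, h]

theorem pvG_of_not_alias {t : String} (h : pvIsAlias t = false) : pvG t = [t] := by
  simp only [pvIsAlias] at h
  rw [pv_get?_aliases] at h
  split_ifs at h with h1 h2 h3 h4 <;> simp_all [pvG]

theorem pvPassB_eq (toks : List String) :
    pvPassB toks = (toks.flatMap pvStepB, toks.any pvIsAlias) := by
  suffices h : ∀ (a : List String) (b : Bool),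
      toks.foldl (fun st t =>
        match PySem.Dict.get? pvAliases t with
        | some v => (st.1 ++ pvNormSplit v, true)
        | none => (st.1 ++ [t], st.2)) (a, b)
      = (a ++ toks.flatMap pvStepB, b || toks.any pvIsAlias) by
    simpa [pvPassB] using h [] false
  induction toks with
  | nil => simp
  | cons t ts ih =>
    intro a b
    cases hg : PySem.Dict.get? pvAliases t with
    | some v =>
      simp [List.foldl_cons, hg, ih, pvStepB, pvIsAlias, List.flatMap_cons, List.append_assoc]
    | none =>
      simp [List.foldl_cons, hg, ih, pvStepB, pvIsAlias, List.flatMap_cons, List.append_assoc]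

theorem pv_flatMap_g_stepB (t : String) : (pvStepB t).flatMap pvG = pvG t := by
  by_cases ha : pvIsAlias t = false
  · rw [pvStepB_of_not_alias ha]; simp
  · simp only [Bool.not_eq_false, pvIsAlias] at ha
    rw [pv_get?_aliases] at ha
    simp only [pvStepB]
    rw [pv_get?_aliases]
    split_ifs at ha ⊢ with h1 h2 h3 h4
    · subst h1; decide
    · subst h2; decide
    · subst h3; decide
    · subst h4; decide
    · simp at ha

theorem pv_noalias_step2 (t : String) : ((pvStepB t).flatMap pvStepB).any pvIsAlias = false := by
  by_cases ha : pvIsAlias t = false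
  · rw [pvStepB_of_not_alias ha]
    simp only [List.flatMap_cons, List.flatMap_nil, List.append_nil, pvStepB_of_not_alias ha]
    simp [ha]
  · simp only [Bool.not_eq_false, pvIsAlias] at ha
    rw [pv_get?_aliases] at ha
    simp only [pvStepB]
    rw [pv_get?_aliases]
    split_ifs at ha ⊢ with h1 h2 h3 h4
    · subst h1; decide
    · subst h2; decide
    · subst h3; decide
    · subst h4; decide
    · simp at ha

theorem pv_flatMap_g_flatMap_stepB (toks : List String) :
    (toks.flatMap pvStepB).flatMap pvG = toks.flatMap pvG := by
  induction toks with
  | nil => rfl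
  | cons t ts ih =>
    simp only [List.flatMap_cons, List.flatMap_append, ih, pv_flatMap_g_stepB]

theorem pv_noalias_twopass (toks : List String) :
    ((toks.flatMap pvStepB).flatMap pvStepB).any pvIsAlias = false := by
  induction toks with
  | nil => rfl
  | cons t ts ih =>
    simp only [List.flatMap_cons, List.flatMap_append, List.any_append, ih,
      pv_noalias_step2, Bool.or_false]

theorem pv_flatMap_g_id {toks : List String} (h : toks.any pvIsAlias = false) :
    toks.flatMap pvG = toks := by
  induction toks with
  | nil => rfl
  | cons t ts ih =>
    simp only [List.any_cons, Bool.or_eq_false_iff] at h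
    simp [List.flatMap_cons, ih h.2, pvG_of_not_alias h.1]

theorem pvLoopB_succ (n : Nat) (toks : List String) :
    pvLoopB (n+1) toks = if (pvPassB toks).2 then pvLoopB n (pvPassB toks).1 else toks := rfl

theorem pvLoopB_fix {n : Nat} {toks : List String} (h : toks.any pvIsAlias = false) :
    pvLoopB (n+1) toks = toks := by
  rw [pvLoopB_succ, pvPassB_eq]
  simp [h]

theorem pvLoopB_step {n : Nat} {toks : List String} (h : toks.any pvIsAlias = true) :
    pvLoopB (n+1) toks = pvLoopB n (toks.flatMap pvStepB) := by
  rw [pvLoopB_succ, pvPassB_eq]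
  simp [h]

theorem pvLoopB4_eq (toks : List String) : pvLoopB 4 toks = toks.flatMap pvG := by
  by_cases h1 : toks.any pvIsAlias = false
  · rw [show (4 : Nat) = 3 + 1 from rfl, pvLoopB_fix h1, pv_flatMap_g_id h1]
  · rw [Bool.not_eq_false] at h1
    rw [show (4 : Nat) = 3 + 1 from rfl, pvLoopB_step h1]
    by_cases h2 : (toks.flatMap pvStepB).any pvIsAlias = false
    · rw [show (3 : Nat) = 2 + 1 from rfl, pvLoopB_fix h2]
      calc toks.flatMap pvStepB
          = (toks.flatMap pvStepB).flatMap pvG := (pv_flatMap_g_id h2).symm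
        _ = toks.flatMap pvG := pv_flatMap_g_flatMap_stepB toks
    · rw [Bool.not_eq_false] at h2
      rw [show (3 : Nat) = 2 + 1 from rfl, pvLoopB_step h2,
          show (2 : Nat) = 1 + 1 from rfl, pvLoopB_fix (pv_noalias_twopass toks)]
      calc ((toks.flatMap pvStepB).flatMap pvStepB)
          = ((toks.flatMap pvStepB).flatMap pvStepB).flatMap pvG :=
            (pv_flatMap_g_id (pv_noalias_twopass toks)).symm
        _ = (toks.flatMap pvStepB).flatMap pvG := pv_flatMap_g_flatMap_stepB _
        _ = toks.flatMap pvG := pv_flatMap_g_flatMap_stepB toks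

theorem pvDedup_eq_aux (toks out : List String) :
    (toks.foldl (fun st t =>
        if !(PySem.Set.contains st.1 t) then (PySem.Set.add st.1 t, st.2 ++ [t]) else st)
      ((PySem.Set.ofList out : PySem.Set String), out)).2
    = toks.foldl (fun acc t => if !(acc.contains t) then acc ++ [t] else acc) out := by
  induction toks generalizing out with
  | nil => rfl
  | cons t ts ih =>
    simp only [List.foldl_cons]
    by_cases hm : t ∈ out
    · have hc1 : PySem.Set.contains (PySem.Set.ofList out) t = true :=
        (PySem.Set.contains_iff _ _).mpr ((PySem.Set.mem_ofList out t).mpr hm)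
      have hc2 : out.contains t = true := by simp [hm]
      rw [hc1, hc2]
      simpa using ih out
    · have hc1 : PySem.Set.contains (PySem.Set.ofList out) t = false := by
        rw [Bool.eq_false_iff]
        intro hcon
        exact hm ((PySem.Set.mem_ofList out t).mp ((PySem.Set.contains_iff _ _).mp hcon))
      have hc2 : out.contains t = false := by simp [hm]
      rw [hc1, hc2]
      have hadd : PySem.Set.add (PySem.Set.ofList out) t = PySem.Set.ofList (out ++ [t]) :=
        (PySem.Set.ofList_append_singleton out t).symm
      simpa [hadd] using ih (out ++ [t])

theorem pvB_eq (r : String) :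
    expand_runtime_name_py_alt r = pvDedupA ((pvNormSplit r).flatMap pvG) := by
  show pvDedupB (pvLoopB 4 (pvNormSplit r)) = _
  rw [pvLoopB4_eq]
  have h := pvDedup_eq_aux ((pvNormSplit r).flatMap pvG) []
  simpa [pvDedupB, pvDedupA] using h

-- ===== VERDICT (by name: the statement is the Claim_ definition above) =====
theorem expand_runtime_name_py_spec : Claim_equal_expand_runtime_name_py := by
  intro r _
  unfold Spec_expand_runtime_name_py
  rw [pvA_eq, pvB_eq]
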